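-- pv_equiv track=rewrite | github.com/aeye-lab/eye-movement-preprocessing | preprocessing/feature_extraction.py | get_blink_events_from_eye_states
-- ===== SOURCE A (Python) =====
-- def get_blink_events_from_eye_states(eye_states, close_labels=[1]):
--     blink_events = []
--     prev_label = False
--     cur_blink_event = []
--     for i in range(len(eye_states)):
--         cur_label = False
--         if eye_states[i] in close_labels:
--             cur_label = True
--
--         if cur_label == True:
--             cur_blink_event.append(i)
--         elif prev_label == False and cur_label == False:
--             continue
--         elif prev_label == True and cur_label == False:
--             blink_events.append(cur_blink_event)
--             cur_blink_event = []
--         prev_label = cur_label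
--     if len(cur_blink_event) > 0:
--         blink_events.append(cur_blink_event)
--     return blink_events
-- ===== SOURCE B (Python) =====
-- def get_blink_events_from_eye_states(eye_states, close_labels=[1]):
--     # Run-scanner: find each maximal run of closed-eye samples and emit its
--     # index range directly; no prev_label state machine, no accumulator list.
--     blink_events = []
--     n = len(eye_states)
--     i = 0
--     while i < n:
--         if eye_states[i] in close_labels:
--             j = i + 1
--             while j < n and eye_states[j] in close_labels:
--                 j += 1
--             blink_events.append(list(range(i, j)))
--             i = j
--         else:
--             i += 1
--     return blink_events
-- ===== Notes on version B (the rewrite author's own statement) =====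
-- stated objective: simpler
-- what changed: Replaced the prev_label/cur_blink_event state machine with a run-scanner: an outer loop finds the start of each maximal closed-eye run, an inner scan finds its end, and the event is emitted as list(range(i, j)) in one step.
import Mathlib
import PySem

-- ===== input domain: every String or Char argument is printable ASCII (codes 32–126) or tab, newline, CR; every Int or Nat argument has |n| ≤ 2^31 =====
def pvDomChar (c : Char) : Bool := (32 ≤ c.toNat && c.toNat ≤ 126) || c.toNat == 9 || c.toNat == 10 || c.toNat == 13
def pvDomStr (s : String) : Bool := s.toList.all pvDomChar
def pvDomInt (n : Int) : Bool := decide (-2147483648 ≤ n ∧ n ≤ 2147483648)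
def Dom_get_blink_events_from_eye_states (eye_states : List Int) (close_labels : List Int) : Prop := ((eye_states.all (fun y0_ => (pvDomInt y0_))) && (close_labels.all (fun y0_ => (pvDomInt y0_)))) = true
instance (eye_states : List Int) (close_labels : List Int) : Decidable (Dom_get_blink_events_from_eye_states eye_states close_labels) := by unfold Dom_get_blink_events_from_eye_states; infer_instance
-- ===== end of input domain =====

-- B replaces A's prev_label/cur_blink_event state machine with a run-scanner that
-- emits each maximal closed-eye run of indices in one step (objective: simpler).

-- ===== PORT A =====
-- literal transliteration of A: a fold over range(len(eye_states)) carrying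
-- (blink_events, prev_label, cur_blink_event), then the final flush.
def get_blink_events_from_eye_states (eye_states : List Int) (close_labels : List Int) : List (List Int) :=
  let st := (PySem.List.pyRange 0 (eye_states.length : Int) 1).foldl
    (fun (st : List (List Int) × Bool × List Int) (i : Int) =>
      let cur_label := close_labels.contains (PySem.List.pyGetD eye_states i 0)
      if cur_label = true then (st.1, cur_label, st.2.2 ++ [i])
      else if st.2.1 = false ∧ cur_label = false then st
      else if st.2.1 = true ∧ cur_label = false then (st.1 ++ [st.2.2], cur_label, [])
      else (st.1, cur_label, st.2.2))
    ([], false, [])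
  if 0 < st.2.2.length then st.1 ++ [st.2.2] else st.1

-- ===== PORT B =====
-- outer loop = recursion over the enumerated suffix; inner while = takeWhile scan of the run
def pvAltGo (close_labels : List Int) : List (Int × Int) → List (List Int)
  | [] => []
  | (i, v) :: rest =>
      if close_labels.contains v then
        let run := rest.takeWhile (fun p => close_labels.contains p.2)
        (i :: run.map Prod.fst) :: pvAltGo close_labels (rest.drop run.length)
      else
        pvAltGo close_labels rest
termination_by l => l.length
decreasing_by
  · simp only [List.length_drop, List.length_cons]; omega
  · simp

def get_blink_events_from_eye_states_alt (eye_states : List Int) (close_labels : List Int) : List (List Int) :=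
  pvAltGo close_labels (PySem.List.enumerate eye_states 0)

-- ===== PRECONDITION & SPEC =====
def Spec_get_blink_events_from_eye_states (eye_states : List Int) (close_labels : List Int) (out : List (List Int)) : Prop := out = get_blink_events_from_eye_states_alt eye_states close_labels
instance (eye_states : List Int) (close_labels : List Int) (out : List (List Int)) : Decidable (Spec_get_blink_events_from_eye_states eye_states close_labels out) := by unfold Spec_get_blink_events_from_eye_states; infer_instance

-- ===== CLAIM (what is proved, stated in full; the proofs are below) =====
def Claim_equal_get_blink_events_from_eye_states : Prop := ∀ (eye_states : List Int) (close_labels : List Int), Dom_get_blink_events_from_eye_states eye_states close_labels → Spec_get_blink_events_from_eye_states eye_states close_labels (get_blink_events_from_eye_states eye_states close_labels)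

-- ===== LEMMAS AND PROOFS =====

-- A's loop body, as a function of an (index, value) pair
def pvStepA (cl : List Int) (st : List (List Int) × Bool × List Int) (t : Int × Int) :
    List (List Int) × Bool × List Int :=
  let cur_label := cl.contains t.2
  if cur_label = true then (st.1, cur_label, st.2.2 ++ [t.1])
  else if st.2.1 = false ∧ cur_label = false then st
  else if st.2.1 = true ∧ cur_label = false then (st.1 ++ [st.2.2], cur_label, [])
  else (st.1, cur_label, st.2.2)

-- A's final flush
def pvFinish (st : List (List Int) × Bool × List Int) : List (List Int) :=
  if 0 < st.2.2.length then st.1 ++ [st.2.2] else st.1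

theorem pvDropLenTakeWhile {α : Type} (p : α → Bool) (l : List α) :
    l.drop (l.takeWhile p).length = l.dropWhile p := by
  induction l with
  | nil => rfl
  | cons a l ih =>
      by_cases h : p a <;>
        simp [h, ih]

theorem pvAltGo_cons (cl : List Int) (i v : Int) (rest : List (Int × Int)) :
    pvAltGo cl ((i, v) :: rest) =
      if cl.contains v then
        (i :: (rest.takeWhile (fun p => cl.contains p.2)).map Prod.fst)
          :: pvAltGo cl (rest.dropWhile (fun p => cl.contains p.2))
      else pvAltGo cl rest := by
  rw [pvAltGo]
  simp only [pvDropLenTakeWhile]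

theorem pvMain (cl : List Int) (l : List (Int × Int)) :
    (∀ ev : List (List Int),
      pvFinish (l.foldl (pvStepA cl) (ev, false, [])) = ev ++ pvAltGo cl l) ∧
    (∀ (ev : List (List Int)) (cur : List Int), cur ≠ [] →
      pvFinish (l.foldl (pvStepA cl) (ev, true, cur)) =
        ev ++ ((cur ++ (l.takeWhile (fun p => cl.contains p.2)).map Prod.fst)
                :: pvAltGo cl (l.dropWhile (fun p => cl.contains p.2)))) := by
  induction l with
  | nil =>
      refine ⟨fun ev => by simp [pvFinish, pvAltGo], fun ev cur hcur => ?_⟩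
      simp [pvFinish, pvAltGo, List.length_pos_iff, hcur]
  | cons t rest ih =>
      obtain ⟨t1, t2⟩ := t
      by_cases hm : cl.contains t2 = true
      · have hmem : t2 ∈ cl := by simpa using hm
        refine ⟨fun ev => ?_, fun ev cur hcur => ?_⟩
        · have hstep : pvStepA cl (ev, false, []) (t1, t2) = (ev, true, [t1]) := by
            simp [pvStepA, hmem]
          rw [List.foldl_cons, hstep, ih.2 ev [t1] (by simp), pvAltGo_cons, if_pos hm]
          simp
        · have hstep : pvStepA cl (ev, true, cur) (t1, t2) = (ev, true, cur ++ [t1]) := by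
            simp [pvStepA, hmem]
          rw [List.foldl_cons, hstep, ih.2 ev (cur ++ [t1]) (by simp),
            List.takeWhile_cons_of_pos (p := fun p : Int × Int => cl.contains p.2) (l := rest) hm,
            List.dropWhile_cons_of_pos (p := fun p : Int × Int => cl.contains p.2) (l := rest) hm]
          simp
      · have hm' : cl.contains t2 = false := by simpa using hm
        have hnmem : t2 ∉ cl := by simpa using hm'
        refine ⟨fun ev => ?_, fun ev cur hcur => ?_⟩
        · have hstep : pvStepA cl (ev, false, []) (t1, t2) = (ev, false, []) := by
            simp [pvStepA, hnmem]
          rw [List.foldl_cons, hstep, ih.1 ev, pvAltGo_cons, if_neg hm]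
        · have hstep : pvStepA cl (ev, true, cur) (t1, t2) = (ev ++ [cur], false, []) := by
            simp [pvStepA, hnmem]
          rw [List.foldl_cons, hstep, ih.1 (ev ++ [cur]),
            List.takeWhile_cons_of_neg (p := fun p : Int × Int => cl.contains p.2) (l := rest) (by simpa using hm'),
            List.dropWhile_cons_of_neg (p := fun p : Int × Int => cl.contains p.2) (l := rest) (by simpa using hm'),
            pvAltGo_cons, if_neg hm]
          simp

theorem pvA_eq (es cl : List Int) :
    get_blink_events_from_eye_states es cl =
      pvFinish ((PySem.List.enumerate es 0).foldl (pvStepA cl) ([], false, [])) := by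
  rw [PySem.List.enumerate_eq_map_pyRange (d := 0), List.foldl_map]
  rfl

-- ===== VERDICT (by name: the statement is the Claim_ definition above) =====
theorem get_blink_events_from_eye_states_spec : Claim_equal_get_blink_events_from_eye_states := by
  intro es cl _
  unfold Spec_get_blink_events_from_eye_states get_blink_events_from_eye_states_alt
  rw [pvA_eq]
  simpa using (pvMain cl (PySem.List.enumerate es 0)).1 []
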